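-- pv_equiv track=rewrite | github.com/PAUL-Zf/HighOrderNetwork | backend/app/routes/index.py | mergePOI
-- ===== SOURCE A (Python) =====
-- def mergePOI(data):
--     for flow in data:
--         extra = 0
--         sorted_id = sorted(
--             range(len(flow)), key=lambda k: flow[k], reverse=True)
--         top = sorted_id[:3]
--         for i in range(len(flow)):
--             if i not in top:
--                 extra += flow[i]
--                 flow[i] = 0
--         flow.insert(0, extra)
--     return data
-- ===== SOURCE B (Python) =====
-- def mergePOI(data):
--     for flow in data:
--         kept = []
--         for _ in range(3):
--             best = None
--             for i, v in enumerate(flow):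
--                 if i not in kept and (best is None or v > best[1]):
--                     best = (i, v)
--             if best is None:
--                 break
--             kept.append(best[0])
--         extra = 0
--         out = []
--         for i, v in enumerate(flow):
--             if i in kept:
--                 out.append(v)
--             else:
--                 extra += v
--                 out.append(0)
--         flow[:] = out
--         flow.insert(0, extra)
--     return data
-- ===== Notes on version B (the rewrite author's own statement) =====
-- stated objective: alternative
-- what changed: Replaces A's stable full sort of the index range by three greedy max-scans (strict-greater update gives the earliest-index tie-break) to find the kept indices, and rebuilds each flow in one pass instead of zeroing by index into the mutated list.
import Mathlib
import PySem

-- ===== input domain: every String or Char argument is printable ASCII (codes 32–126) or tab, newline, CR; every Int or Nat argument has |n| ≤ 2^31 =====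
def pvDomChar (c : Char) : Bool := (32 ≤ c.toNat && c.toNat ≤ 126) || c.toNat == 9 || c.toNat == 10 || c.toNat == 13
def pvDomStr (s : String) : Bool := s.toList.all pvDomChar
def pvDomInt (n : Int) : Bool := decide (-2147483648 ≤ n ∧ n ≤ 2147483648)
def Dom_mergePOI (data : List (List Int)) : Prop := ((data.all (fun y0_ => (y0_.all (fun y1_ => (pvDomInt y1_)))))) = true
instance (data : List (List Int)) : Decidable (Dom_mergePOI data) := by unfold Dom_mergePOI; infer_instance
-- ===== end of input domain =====

-- B replaces A's full stable sort of the index range by three greedy max-scans (strict-greater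
-- update = earliest-index tie-break) and a single rebuild pass; same return value, and like A's
-- Python B mutates each flow of data in place (flow[:] = ..., insert), so side effects match A.

-- ===== PORT A =====
-- per-flow body of A's outer loop (A mutates flow in place; the fold state (extra, flow) carries it)
def mergePOI_flowA (flow : List Int) : List Int :=
  let sorted_id := PySem.List.sorted (PySem.List.pyRange 0 (flow.length : Int))
      (fun k => PySem.List.pyGetD flow k 0) true     -- key = flow[k], always in range
  let top := PySem.List.slice sorted_id none (some 3)
  let st := (PySem.List.pyRange 0 (flow.length : Int)).foldl
      (fun (st : Int × List Int) i =>
        if i ∈ top then st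
        else (st.1 + PySem.List.pyGetD st.2 i 0, PySem.List.pySetD st.2 i 0)) (0, flow)
  PySem.List.insert st.2 0 st.1

def mergePOI (data : List (List Int)) : List (List Int) :=
  data.map mergePOI_flowA

-- ===== PORT B =====
-- 'best is None or v > best[1]'
def mergePOI_better (best : Option (Int × Int)) (p : Int × Int) : Bool :=
  match best with
  | none => true
  | some b => decide (b.2 < p.2)

-- body of B's inner 'for i, v in enumerate(flow)' scan
def mergePOI_step (kept : List Int) (best : Option (Int × Int)) (p : Int × Int) : Option (Int × Int) :=
  if !(kept.contains p.1) && mergePOI_better best p then some p else best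

def mergePOI_scan (kept : List Int) (ps : List (Int × Int)) : Option (Int × Int) :=
  ps.foldl (mergePOI_step kept) none

-- 'for _ in range(3): ... if best is None: break; kept.append(best[0])'
def mergePOI_pick (flow : List Int) : Nat → List Int → List Int
  | 0, kept => kept
  | t + 1, kept =>
    match mergePOI_scan kept (PySem.List.enumerate flow 0) with
    | none => kept
    | some b => mergePOI_pick flow t (kept ++ [b.1])

def mergePOI_flowB (flow : List Int) : List Int :=
  let kept := mergePOI_pick flow 3 []
  let st := (PySem.List.enumerate flow 0).foldl
      (fun (st : Int × List Int) p =>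
        if p.1 ∈ kept then (st.1, st.2 ++ [p.2])
        else (st.1 + p.2, st.2 ++ [0])) (0, [])
  st.1 :: st.2

def mergePOI_alt (data : List (List Int)) : List (List Int) :=
  data.map mergePOI_flowB

-- ===== PRECONDITION & SPEC =====
def Spec_mergePOI (data : List (List Int)) (out : List (List Int)) : Prop := out = mergePOI_alt data
instance (data : List (List Int)) (out : List (List Int)) : Decidable (Spec_mergePOI data out) := by unfold Spec_mergePOI; infer_instance

-- ===== CLAIM (what is proved, stated in full; the proofs are below) =====
def Claim_equal_mergePOI : Prop := ∀ (data : List (List Int)), Dom_mergePOI data → Spec_mergePOI data (mergePOI data)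

-- ===== LEMMAS AND PROOFS =====

-- the key of index k in flow f
def pvKey (f : List Int) (k : Int) : Int := PySem.List.pyGetD f k 0

-- the strict order that A's stable reverse sort realises on the (distinct) indices:
-- larger value first, ties by smaller index first
def pvR (f : List Int) (a b : Int) : Prop :=
  pvKey f b < pvKey f a ∨ (pvKey f a = pvKey f b ∧ a < b)

def pvS (f : List Int) : List Int :=
  PySem.List.sorted (PySem.List.pyRange 0 (f.length : Int)) (pvKey f) true

lemma pvS_perm (f : List Int) : (pvS f).Perm (PySem.List.pyRange 0 (f.length : Int)) :=
  PySem.List.sorted_perm _ _ _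

lemma pvS_length (f : List Int) : (pvS f).length = f.length := by
  have h := (pvS_perm f).length_eq
  rw [h, PySem.List.length_pyRange_one]
  omega

lemma pvS_mem (f : List Int) (x : Int) : x ∈ pvS f ↔ 0 ≤ x ∧ x < (f.length : Int) := by
  rw [(pvS_perm f).mem_iff, PySem.List.mem_pyRange_one]

-- stability: insertBy with the strict reverse comparison keeps pvR-sortedness
-- when the inserted index is larger than everything present
lemma pv_insertBy_pairwise (f : List Int) (x : Int) :
    ∀ (acc : List Int), acc.Pairwise (pvR f) → (∀ y ∈ acc, y < x) →
      (PySem.List.insertBy (fun a b => decide (pvKey f b < pvKey f a)) x acc).Pairwise (pvR f) := by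
  intro acc
  induction acc with
  | nil => intro _ _; simp [PySem.List.insertBy]
  | cons y ys ih =>
    intro hp hlt
    rw [List.pairwise_cons] at hp
    by_cases hxy : pvKey f y < pvKey f x
    · have : PySem.List.insertBy (fun a b => decide (pvKey f b < pvKey f a)) x (y :: ys) = x :: y :: ys := by
        simp [PySem.List.insertBy, hxy]
      rw [this, List.pairwise_cons]
      refine ⟨?_, by rw [List.pairwise_cons]; exact hp⟩
      intro z hz
      rcases List.mem_cons.mp hz with rfl | hz'
      · exact Or.inl hxy
      · rcases hp.1 z hz' with h | ⟨h1, h2⟩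
        · exact Or.inl (lt_trans h hxy)
        · exact Or.inl (h1 ▸ hxy)
    · have : PySem.List.insertBy (fun a b => decide (pvKey f b < pvKey f a)) x (y :: ys) =
          y :: PySem.List.insertBy (fun a b => decide (pvKey f b < pvKey f a)) x ys := by
        simp [PySem.List.insertBy, hxy]
      rw [this, List.pairwise_cons]
      constructor
      · intro z hz
        rcases (PySem.List.mem_insertBy _ _ _ _).mp hz with rfl | hz'
        · rcases lt_or_eq_of_le (le_of_not_gt hxy) with h | h
          · exact Or.inl h
          · exact Or.inr ⟨h.symm, hlt y List.mem_cons_self⟩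
        · exact hp.1 z hz'
      · exact ih hp.2 (fun z hz => hlt z (List.mem_cons_of_mem _ hz))

lemma pv_foldl_insertBy_pairwise (f : List Int) :
    ∀ (l : List Int) (acc : List Int), acc.Pairwise (pvR f) →
      (∀ y ∈ acc, ∀ x ∈ l, y < x) → l.Pairwise (· < ·) →
      (l.foldl (fun acc x => PySem.List.insertBy (fun a b => decide (pvKey f b < pvKey f a)) x acc) acc).Pairwise (pvR f) := by
  intro l
  induction l with
  | nil => intro acc hp _ _; exact hp
  | cons x xs ih =>
    intro acc hp hlt hl
    rw [List.pairwise_cons] at hl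
    rw [List.foldl_cons]
    refine ih _ (pv_insertBy_pairwise f x acc hp (fun y hy => hlt y hy x List.mem_cons_self)) ?_ hl.2
    intro y hy z hz
    rcases (PySem.List.mem_insertBy _ _ _ _).mp hy with rfl | hy'
    · exact hl.1 z hz
    · exact hlt y hy' z (List.mem_cons_of_mem _ hz)

lemma pvS_pairwise (f : List Int) : (pvS f).Pairwise (pvR f) := by
  unfold pvS
  rw [PySem.List.sorted_rev_eq_foldl_insertBy]
  exact pv_foldl_insertBy_pairwise f _ [] (by simp) (by simp)
    (PySem.List.pairwise_lt_pyRange_one _ _)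

-- scan behaviour lemmas
lemma pv_scan_mem (kept : List Int) :
    ∀ (ps : List (Int × Int)) (b : Option (Int × Int)),
      ps.foldl (mergePOI_step kept) b = b ∨
      ∃ p ∈ ps, kept.contains p.1 = false ∧ ps.foldl (mergePOI_step kept) b = some p := by
  intro ps
  induction ps with
  | nil => intro b; left; rfl
  | cons p ps ih =>
    intro b
    rw [List.foldl_cons]
    rcases ih (mergePOI_step kept b p) with h | ⟨q, hq, hc, hres⟩
    · rw [h]
      unfold mergePOI_step
      split_ifs with hcond
      · simp only [Bool.and_eq_true, Bool.not_eq_true'] at hcond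
        exact Or.inr ⟨p, List.mem_cons_self, hcond.1, rfl⟩
      · exact Or.inl rfl
    · exact Or.inr ⟨q, List.mem_cons_of_mem _ hq, hc, hres⟩

lemma pv_scan_skip (kept : List Int) :
    ∀ (ps : List (Int × Int)) (b : Option (Int × Int)),
      (∀ p ∈ ps, kept.contains p.1 = true) → ps.foldl (mergePOI_step kept) b = b := by
  intro ps
  induction ps with
  | nil => intro b _; rfl
  | cons p ps ih =>
    intro b h
    rw [List.foldl_cons]
    have hstep : mergePOI_step kept b p = b := by
      unfold mergePOI_step
      have hm : p.1 ∈ kept := by simpa using h p List.mem_cons_self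
      simp [hm]
    rw [hstep]
    exact ih b (fun q hq => h q (List.mem_cons_of_mem _ hq))

lemma pv_scan_keep (kept : List Int) (w : Int × Int) :
    ∀ (ps : List (Int × Int)),
      (∀ p ∈ ps, kept.contains p.1 = false → ¬ (w.2 < p.2)) →
      ps.foldl (mergePOI_step kept) (some w) = some w := by
  intro ps
  induction ps with
  | nil => intro _; rfl
  | cons p ps ih =>
    intro h
    rw [List.foldl_cons]
    have hstep : mergePOI_step kept (some w) p = some w := by
      unfold mergePOI_step mergePOI_better
      rcases hc : kept.contains p.1 with _ | _
      · have := h p List.mem_cons_self hc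
        simp [this]
      · have hm : p.1 ∈ kept := by simpa using hc
        simp [hm]
    rw [hstep]
    exact ih (fun q hq => h q (List.mem_cons_of_mem _ hq))

lemma pv_scan_winner (kept : List Int) (pre suf : List (Int × Int)) (w : Int × Int)
    (hw : kept.contains w.1 = false)
    (hpre : ∀ p ∈ pre, kept.contains p.1 = false → p.2 < w.2)
    (hsuf : ∀ p ∈ suf, kept.contains p.1 = false → ¬ (w.2 < p.2)) :
    mergePOI_scan kept (pre ++ w :: suf) = some w := by
  unfold mergePOI_scan
  rw [List.foldl_append, List.foldl_cons]
  have hafter : mergePOI_step kept (pre.foldl (mergePOI_step kept) none) w = some w := by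
    rcases pv_scan_mem kept pre none with h | ⟨q, hq, hc, hres⟩
    · rw [h]
      unfold mergePOI_step mergePOI_better
      have hw' : w.1 ∉ kept := by simpa using hw
      simp [hw']
    · rw [hres]
      unfold mergePOI_step mergePOI_better
      have hw' : w.1 ∉ kept := by simpa using hw
      have := hpre q hq hc
      simp [hw', this]
  rw [hafter]
  exact pv_scan_keep kept w suf hsuf

-- relating any index of f, not yet kept and not the m-th sorted one, to the m-th sorted index
lemma pv_beats (f : List Int) (m : Nat) (hm : m < (pvS f).length) (k : Nat) (hk : k < f.length)
    (hnk : ((k : Int)) ∉ (pvS f).take m) (hne : ((k : Int)) ≠ (pvS f)[m]) :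
    f[k] < pvKey f ((pvS f)[m]) ∨ (pvKey f ((pvS f)[m]) = f[k] ∧ (pvS f)[m] < (k : Int)) := by
  have hmem : ((k : Int)) ∈ pvS f := by
    rw [pvS_mem]
    constructor
    · exact Int.natCast_nonneg k
    · exact_mod_cast hk
  obtain ⟨l, hl, hlk⟩ := List.mem_iff_getElem.mp hmem
  have hlm : m < l := by
    rcases Nat.lt_trichotomy l m with h | h | h
    · exact absurd (List.mem_take_iff_getElem.mpr ⟨l, by omega, hlk⟩) hnk
    · subst h
      exact absurd hlk.symm hne
    · exact h
  have hr := List.pairwise_iff_getElem.mp (pvS_pairwise f) m l hm hl hlm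
  rw [hlk] at hr
  have hkey : pvKey f ((k : Int)) = f[k] := by
    unfold pvKey
    rw [PySem.List.pyGetD_natCast, List.getD_eq_getElem _ _ hk]
  unfold pvR at hr
  rcases hr with h | ⟨h1, h2⟩
  · rw [hkey] at h
    exact Or.inl h
  · rw [hkey] at h1
    exact Or.inr ⟨h1, h2⟩

-- round m of the greedy selection returns exactly the m-th element of the stable sort
lemma pv_scan_round (f : List Int) (m : Nat) (hm : m < (pvS f).length) :
    ∃ v : Int, mergePOI_scan ((pvS f).take m) (PySem.List.enumerate f 0) =
      some ((pvS f)[m], v) := by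
  have hlen : f.length = (pvS f).length := (pvS_length f).symm
  have hi : 0 ≤ (pvS f)[m] ∧ (pvS f)[m] < (f.length : Int) :=
    (pvS_mem f _).mp (List.getElem_mem hm)
  set i : Int := (pvS f)[m] with hidef
  have hj : i.toNat < f.length := by omega
  set j : Nat := i.toNat with hjdef
  have hji : (j : Int) = i := Int.toNat_of_nonneg hi.1
  have hplen : j < (PySem.List.enumerate f 0).length := by
    rw [PySem.List.length_enumerate]; exact hj
  have hw : (PySem.List.enumerate f 0)[j] = (i, f[j]) := by
    rw [PySem.List.getElem_enumerate]
    simp [hji]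
  have hdecomp : PySem.List.enumerate f 0 =
      (PySem.List.enumerate f 0).take j ++ (i, f[j]) :: (PySem.List.enumerate f 0).drop (j + 1) := by
    conv_lhs => rw [← List.take_append_drop j (PySem.List.enumerate f 0)]
    rw [List.drop_eq_getElem_cons hplen, hw]
  have hnotkept : i ∉ (pvS f).take m := by
    intro hmem
    obtain ⟨l, hl, hlk⟩ := List.mem_take_iff_getElem.mp hmem
    have hnd : (pvS f).Nodup := (pvS_perm f).nodup_iff.mpr (PySem.List.nodup_pyRange_one _ _)
    have : l = m := (hnd.getElem_inj_iff).mp (by rw [hlk])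
    omega
  refine ⟨f[j], ?_⟩
  rw [hdecomp]
  apply pv_scan_winner
  · simpa using hnotkept
  · intro p hp hc
    obtain ⟨k, hkm, hkp⟩ := List.mem_take_iff_getElem.mp hp
    have hk : k < f.length := by
      have := hkm; rw [PySem.List.length_enumerate] at this; omega
    have hpk : p = ((k : Int), f[k]) := by
      rw [← hkp, PySem.List.getElem_enumerate]; simp
    have hkj : k < j := by omega
    have hne : ((k : Int)) ≠ i := by
      intro h; rw [← hji] at h; exact absurd (by exact_mod_cast h) (Nat.ne_of_lt hkj)
    have hnk : ((k : Int)) ∉ (pvS f).take m := by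
      intro h; apply absurd h; subst hpk; simpa using hc
    have hkeyi : pvKey f ((pvS f)[m]) = f[j] := by
      unfold pvKey
      rw [← hidef, ← hji, PySem.List.pyGetD_natCast, List.getD_eq_getElem _ _ hj]
    rcases pv_beats f m hm k hk hnk hne with h | ⟨_, h2⟩
    · rw [hpk]
      rw [hkeyi] at h
      exact h
    · exfalso
      rw [← hidef, ← hji] at h2
      have : j < k := by exact_mod_cast h2
      omega
  · intro p hp hc
    obtain ⟨k', hkm, hkp⟩ := List.mem_drop_iff_getElem.mp hp
    have hk : (j + 1) + k' < f.length := by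
      have := hkm; rw [PySem.List.length_enumerate] at this; omega
    set k : Nat := (j + 1) + k' with hkdef
    have hpk : p = ((k : Int), f[k]'hk) := by
      rw [← hkp, PySem.List.getElem_enumerate]
      refine Prod.ext ?_ rfl
      simp only
      omega
    have hne : ((k : Int)) ≠ i := by
      intro h; rw [← hji] at h
      have : k = j := by exact_mod_cast h
      omega
    have hnk : ((k : Int)) ∉ (pvS f).take m := by
      intro h; apply absurd h; subst hpk; simpa using hc
    have hkeyi : pvKey f ((pvS f)[m]) = f[j] := by
      unfold pvKey
      rw [← hidef, ← hji, PySem.List.pyGetD_natCast, List.getD_eq_getElem _ _ hj]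
    rcases pv_beats f m hm k hk hnk hne with h | ⟨h1, _⟩
    · rw [hpk]; simp only; rw [hkeyi] at h; omega
    · rw [hpk]; simp only; rw [hkeyi] at h1; omega

lemma pv_pick (f : List Int) :
    ∀ (t m : Nat), mergePOI_pick f t ((pvS f).take m) = (pvS f).take (m + t) := by
  intro t
  induction t with
  | zero => intro m; rfl
  | succ t ih =>
    intro m
    unfold mergePOI_pick
    by_cases hm : m < (pvS f).length
    · obtain ⟨v, hscan⟩ := pv_scan_round f m hm
      rw [hscan]
      have hconcat : (pvS f).take m ++ [(pvS f)[m]] = (pvS f).take (m + 1) := by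
        rw [List.take_add_one, List.getElem?_eq_getElem hm]
        rfl
      show mergePOI_pick f t ((pvS f).take m ++ [(pvS f)[m]]) = (pvS f).take (m + (t + 1))
      rw [hconcat, ih (m + 1), show m + 1 + t = m + (t + 1) from by omega]
    · have hself : (pvS f).take m = pvS f := List.take_of_length_le (by omega)
      have hscan : mergePOI_scan ((pvS f).take m) (PySem.List.enumerate f 0) = none := by
        apply pv_scan_skip
        intro p hp
        obtain ⟨k, hk, hkp⟩ := (PySem.List.mem_enumerate_iff _ _ _).mp hp
        have hpm : p.1 ∈ pvS f := by
          rw [hkp, pvS_mem]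
          constructor
          · simpa using Int.natCast_nonneg k
          · simpa using (by exact_mod_cast hk : ((k : Int)) < (f.length : Int))
        rw [hself]
        simpa using hpm
      rw [hscan]
      show (pvS f).take m = (pvS f).take (m + (t + 1))
      rw [hself, List.take_of_length_le (by omega)]

lemma pv_kept_eq_top (f : List Int) : mergePOI_pick f 3 [] = (pvS f).take 3 := by
  have h := pv_pick f 3 0
  simpa using h

-- A's in-place zeroing pass over indices equals B's rebuilding pass over enumerate
lemma pv_loop2 (top : List Int) :
    ∀ (f done : List Int) (e : Int),
      (PySem.List.pyRange (done.length : Int) ((done.length : Int) + (f.length : Int))).foldl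
        (fun (st : Int × List Int) i =>
          if i ∈ top then st
          else (st.1 + PySem.List.pyGetD st.2 i 0, PySem.List.pySetD st.2 i 0)) (e, done ++ f)
      = (PySem.List.enumerate f (done.length : Int)).foldl
          (fun (st : Int × List Int) p =>
            if p.1 ∈ top then (st.1, st.2 ++ [p.2])
            else (st.1 + p.2, st.2 ++ [0])) (e, done) := by
  intro f
  induction f with
  | nil =>
    intro done e
    have h0 : PySem.List.pyRange (done.length : Int)
        ((done.length : Int) + ((List.length ([] : List Int)) : Int)) = [] := by
      apply List.eq_nil_of_length_eq_zero
      rw [PySem.List.length_pyRange_one]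
      simp
    rw [h0]
    simp [PySem.List.enumerate]
  | cons v fs ih =>
    intro done e
    have hlt : (done.length : Int) < (done.length : Int) + (((v :: fs).length) : Int) := by
      simp only [List.length_cons]
      push_cast
      omega
    rw [PySem.List.pyRange_one_cons hlt, List.foldl_cons]
    have henum : PySem.List.enumerate (v :: fs) (done.length : Int) =
        ((done.length : Int), v) :: PySem.List.enumerate fs ((done.length : Int) + 1) := by
      simp [PySem.List.enumerate]
    rw [henum, List.foldl_cons]
    have hget : PySem.List.pyGetD (done ++ v :: fs) (done.length : Int) 0 = v := by
      rw [PySem.List.pyGetD_natCast]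
      rw [List.getD_eq_getElem?_getD, List.getElem?_append_right (le_refl done.length)]
      simp
    have hset : PySem.List.pySetD (done ++ v :: fs) (done.length : Int) 0 = done ++ 0 :: fs := by
      rw [PySem.List.pySetD_natCast, List.set_append_right _ _ (le_refl done.length)]
      simp
    have hrange : PySem.List.pyRange ((done.length : Int) + 1)
          ((done.length : Int) + (((v :: fs).length) : Int)) =
        PySem.List.pyRange (((done ++ [v]).length : Int))
          (((done ++ [v]).length : Int) + ((fs.length) : Int)) := by
      congr 1
      · simp
      · simp only [List.length_append, List.length_cons, List.length_nil]
        push_cast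
        omega
    have hstart : (done.length : Int) + 1 = (((done ++ [v]).length : Int)) := by
      simp
    by_cases htop : (done.length : Int) ∈ top
    · simp only [htop, if_pos]
      have harr : done ++ v :: fs = (done ++ [v]) ++ fs := by simp
      rw [harr, hrange, hstart]
      exact ih (done ++ [v]) e
    · simp only [htop, if_neg, not_false_iff]
      rw [hget, hset]
      have harr : done ++ (0 : Int) :: fs = (done ++ [(0 : Int)]) ++ fs := by simp
      rw [harr, hrange, hstart]
      rw [show (((done ++ [v]).length : Int)) = (((done ++ [(0 : Int)]).length : Int)) from by simp]
      exact ih (done ++ [(0 : Int)]) (e + v)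

lemma pv_flow_eq (f : List Int) : mergePOI_flowA f = mergePOI_flowB f := by
  unfold mergePOI_flowA mergePOI_flowB
  dsimp only
  have htop : PySem.List.slice (PySem.List.sorted (PySem.List.pyRange 0 (f.length : Int))
        (fun k => PySem.List.pyGetD f k 0) true) none (some 3) =
      (PySem.List.sorted (PySem.List.pyRange 0 (f.length : Int))
        (fun k => PySem.List.pyGetD f k 0) true).take 3 := by
    rw [show (3 : Int) = ((3 : Nat) : Int) from rfl, PySem.List.slice_to_natCast]
  have hkept : mergePOI_pick f 3 [] =
      (PySem.List.sorted (PySem.List.pyRange 0 (f.length : Int))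
        (fun k => PySem.List.pyGetD f k 0) true).take 3 := pv_kept_eq_top f
  rw [htop, hkept]
  have hloop := pv_loop2 ((PySem.List.sorted (PySem.List.pyRange 0 (f.length : Int))
      (fun k => PySem.List.pyGetD f k 0) true).take 3) f [] 0
  simp only [List.length_nil, Nat.cast_zero, List.nil_append, zero_add] at hloop
  rw [hloop, PySem.List.insert_zero]

-- ===== VERDICT (by name: the statement is the Claim_ definition above) =====
theorem mergePOI_spec : Claim_equal_mergePOI := by
  intro data _
  unfold Spec_mergePOI mergePOI mergePOI_alt
  exact List.map_congr_left (fun f _ => pv_flow_eq f)
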